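-- pv_equiv track=rewrite | github.com/reedessick/exposure | exposure/utils.py | invsegments
-- ===== SOURCE A (Python) =====
-- def invsegments(start, stop, segs):
--     """
--     takes the inverse of a list of segments between start and stop
--     assumes that all segments are already between start and stop
--     """
--     if not segs:
--         return [[start, stop]]
--
--     newsegments = []
--     for s, e in segs:
--         if start < s <= stop:
--             newsegments.append( [start, s] )
--         start = e
--     if e < stop:
--         newsegments.append( [e, stop] )
--
--     return newsegments
-- ===== SOURCE B (Python) =====
-- def _gaps(pts, stop):
--     """consume a flat boundary list two points at a time, keeping the valid gaps"""
--     if not pts: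
--         return []
--     head = [[pts[0], pts[1]]] if pts[0] < pts[1] <= stop else []
--     return head + _gaps(pts[2:], stop)
--
-- def invsegments(start, stop, segs):
--     """
--     takes the inverse of a list of segments between start and stop
--     assumes that all segments are already between start and stop
--     """
--     if not segs:
--         return [[start, stop]]
--     pts = [start] + [x for seg in segs for x in seg] + [stop]
--     return _gaps(pts, stop)
-- ===== Notes on version B (the rewrite author's own statement) =====
-- stated objective: alternative
-- what changed: Instead of A's single stateful pass that threads a mutated `start` through the segment loop and leaks the loop variable `e` for the tail check, B flattens all boundaries into one flat list [start, s1, e1, ..., sn, en, stop] and recursively consumes that flat stream two points at a time, keeping each pair (l, r) with l < r <= stop as a gap.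
import Mathlib
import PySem

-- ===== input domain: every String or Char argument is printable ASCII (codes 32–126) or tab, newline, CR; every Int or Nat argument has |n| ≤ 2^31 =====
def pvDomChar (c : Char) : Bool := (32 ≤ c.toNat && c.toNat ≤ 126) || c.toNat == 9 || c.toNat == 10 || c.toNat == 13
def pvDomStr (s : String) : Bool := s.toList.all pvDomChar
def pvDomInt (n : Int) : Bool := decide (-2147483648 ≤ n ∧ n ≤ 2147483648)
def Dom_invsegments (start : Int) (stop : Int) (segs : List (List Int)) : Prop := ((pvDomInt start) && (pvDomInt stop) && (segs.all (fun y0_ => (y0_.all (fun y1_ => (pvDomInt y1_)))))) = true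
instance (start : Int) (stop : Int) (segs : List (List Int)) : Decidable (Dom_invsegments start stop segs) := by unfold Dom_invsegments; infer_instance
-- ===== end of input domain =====

-- B flattens all boundaries into one flat list and consumes it recursively two points at a
-- time, instead of A's stateful pass threading a mutated `start` (objective: alternative).

-- ===== PORT A =====
-- `s, e = seg` unpacking; Python raises ValueError unless the segment has exactly 2 elements,
-- so the fallback (0, 0) is unreachable under Pre_invsegments.
def pvA_unpack (seg : List Int) : Int × Int :=
  match seg with
  | [s, e] => (s, e)
  | _ => (0, 0)

-- the `for s, e in segs:` loop, threading the mutated `start`, the accumulator `newsegments`,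
-- and the last value of the loop variable `e`
def pvA_loop (stop : Int) (start : Int) (segs : List (List Int))
    (acc : List (List Int)) (le : Int) : List (List Int) × Int :=
  match segs with
  | [] => (acc, le)
  | seg :: rest =>
    let p := pvA_unpack seg
    pvA_loop stop p.2 rest
      (if start < p.1 ∧ p.1 ≤ stop then acc ++ [[start, p.1]] else acc) p.2

def invsegments (start : Int) (stop : Int) (segs : List (List Int)) : List (List Int) :=
  if segs = [] then [[start, stop]]
  else
    let r := pvA_loop stop start segs [] 0
    if r.2 < stop then r.1 ++ [[r.2, stop]] else r.1

-- ===== PORT B =====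
-- `_gaps(pts, stop)`: recursive two-at-a-time consumption of the flat boundary list.
-- The singleton case is unreachable under Pre_invsegments (Python `pts[1]` would raise there).
def pvGaps (stop : Int) : List Int → List (List Int)
  | [] => []
  | [_] => []
  | l :: r :: rest => (if l < r ∧ r ≤ stop then [[l, r]] else []) ++ pvGaps stop rest

def invsegments_alt (start : Int) (stop : Int) (segs : List (List Int)) : List (List Int) :=
  if segs = [] then [[start, stop]]
  else pvGaps stop (start :: segs.flatMap (fun seg => seg) ++ [stop])

-- ===== PRECONDITION & SPEC =====
-- Pre_ excludes segments that are not pairs: Python's `for s, e in segs` raises ValueError there.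
def Pre_invsegments (start : Int) (stop : Int) (segs : List (List Int)) : Prop :=
  ∀ seg ∈ segs, seg.length = 2
instance (start : Int) (stop : Int) (segs : List (List Int)) : Decidable (Pre_invsegments start stop segs) := by unfold Pre_invsegments; infer_instance
def pvWitness_invsegments : Int × Int × List (List Int) := (0, 10, [[1, 2], [4, 7]])

def Spec_invsegments (start : Int) (stop : Int) (segs : List (List Int)) (out : List (List Int)) : Prop := out = invsegments_alt start stop segs
instance (start : Int) (stop : Int) (segs : List (List Int)) (out : List (List Int)) : Decidable (Spec_invsegments start stop segs out) := by unfold Spec_invsegments; infer_instance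

-- ===== CLAIM (what is proved, stated in full; the proofs are below) =====
def Claim_equal_invsegments : Prop := ∀ (start : Int) (stop : Int) (segs : List (List Int)), Dom_invsegments start stop segs → Pre_invsegments start stop segs → Spec_invsegments start stop segs (invsegments start stop segs)

-- ===== LEMMAS AND PROOFS =====

-- proof-side abbreviation for A's trailing `if e < stop` append
def pvFinish (stop : Int) (r : List (List Int) × Int) : List (List Int) :=
  if r.2 < stop then r.1 ++ [[r.2, stop]] else r.1

-- A's finished loop equals B's two-at-a-time consumption of the flat boundary list,
-- for nonempty lists of pair segments.
lemma pv_loop_eq (stop : Int) : ∀ (segs : List (List Int)) (start le : Int)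
    (acc : List (List Int)), (∀ seg ∈ segs, seg.length = 2) → segs ≠ [] →
    pvFinish stop (pvA_loop stop start segs acc le)
    = acc ++ pvGaps stop (start :: segs.flatMap (fun seg => seg) ++ [stop]) := by
  intro segs
  induction segs with
  | nil => intro _ _ _ _ h; exact absurd rfl h
  | cons seg rest ih =>
    intro start le acc hlen _
    obtain ⟨s, e, rfl⟩ : ∃ s e, seg = [s, e] := by
      have := hlen seg (by simp)
      rcases seg with _ | ⟨s, _ | ⟨e, _ | ⟨x, t⟩⟩⟩
      · simp at this
      · simp at this
      · exact ⟨s, e, rfl⟩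
      · simp at this
    cases rest with
    | nil =>
      simp only [pvFinish, pvA_loop, pvA_unpack, pvGaps, List.flatMap_cons, List.flatMap_nil,
        List.append_nil, List.cons_append, List.nil_append]
      split_ifs <;> simp_all <;> omega
    | cons seg2 rest2 =>
      have h2 : seg2 :: rest2 ≠ [] := by simp
      have hlen2 : ∀ sg ∈ seg2 :: rest2, sg.length = 2 := fun sg hm => hlen sg (by simp [hm])
      rw [show pvA_loop stop start ([s, e] :: seg2 :: rest2) acc le
            = pvA_loop stop e (seg2 :: rest2)
                (if start < s ∧ s ≤ stop then acc ++ [[start, s]] else acc) e from rfl,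
          ih _ _ _ hlen2 h2]
      simp only [List.flatMap_cons, List.cons_append, List.nil_append, pvGaps]
      split_ifs <;> simp [List.append_assoc]

-- ===== VERDICT (by name: the statement is the Claim_ definition above) =====
theorem invsegments_spec : Claim_equal_invsegments := by
  intro start stop segs _ hpre
  unfold Spec_invsegments invsegments invsegments_alt
  by_cases h : segs = []
  · simp [h]
  · simp only [h, if_false]
    exact pv_loop_eq stop segs start 0 [] hpre h
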